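-- pv_equiv track=rewrite | github.com/Vector232/HW_TD | task1.py | get_unicue_names
-- ===== SOURCE A (Python) =====
-- def get_unicue_names(mentors):
--     # Добавьте в список всех преподавателей со всех курсов
--     all_list = []
--     for m in mentors:
--         # Допишите здесь ваш код, который заполнит all_list. Можете как складывать списки, так и использовать метод extend
--         all_list.extend(m)
--     # Сделайте список all_names_list, состоящий только из имён, и заполните его
--     all_names_list = []
--     for mentor in all_list:
--         name = mentor.split()[0]
--         all_names_list.append(name)
--
--     # Сделайте так, чтобы остались только уникальные имена (без повторений) - допишите ниже ваш код
--     unique_names = set(all_names_list)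
--
--     # Теперь необходимо отсортировать имена в алфавитном порядке. Подсказка: используйте sorted() для списка
--     # Допишите код ниже
--     all_names_sorted = sorted(unique_names)
--     # Допишите конструкцию вывода результата. Можете использовать string.join()
--     # Результат будет в all_names_sorted
--     return f'Уникальные имена преподавателей: {", ".join(all_names_sorted)}'
-- ===== SOURCE B (Python) =====
-- def get_unicue_names(mentors):
--     # Sort the full multiset of first names, then dedup adjacent duplicates in one pass.
--     names = sorted(mentor.split()[0] for course in mentors for mentor in course)
--     result = []
--     prev = None
--     for name in names:
--         if name != prev:
--             result.append(name)
--             prev = name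
--     return f'Уникальные имена преподавателей: {", ".join(result)}'
-- ===== Notes on version B (the rewrite author's own statement) =====
-- stated objective: alternative
-- what changed: B replaces A's hash-set deduplication followed by sorting with sorting the full multiset of first names once and removing adjacent duplicates in a single pass over the sorted list.
-- outside the precondition, e.g. on get_unicue_names([['  ', 'Ann X']]): A raises IndexError, B raises IndexError
import Mathlib
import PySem

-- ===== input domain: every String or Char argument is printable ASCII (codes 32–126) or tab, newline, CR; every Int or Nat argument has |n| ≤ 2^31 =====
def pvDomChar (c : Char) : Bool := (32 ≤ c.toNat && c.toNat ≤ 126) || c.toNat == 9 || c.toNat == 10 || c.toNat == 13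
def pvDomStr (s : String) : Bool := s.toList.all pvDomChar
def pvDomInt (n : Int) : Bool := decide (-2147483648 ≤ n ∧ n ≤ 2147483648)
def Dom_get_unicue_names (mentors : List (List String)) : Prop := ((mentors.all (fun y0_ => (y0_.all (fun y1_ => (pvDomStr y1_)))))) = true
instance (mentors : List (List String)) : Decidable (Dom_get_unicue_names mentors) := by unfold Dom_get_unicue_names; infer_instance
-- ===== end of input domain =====

-- B replaces A's set-then-sort distinctness by sort-then-adjacent-dedup (objective: alternative, same output).

-- ===== PORT A =====
-- mentor.split()[0]; none exactly where Python raises IndexError (whitespace-only mentor string)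
def pvFirst? (mentor : String) : Option String :=
  PySem.List.pyGet? (PySem.Str.split₀ mentor) 0

def get_unicue_names (mentors : List (List String)) : String :=
  let all_list := mentors.foldl (fun acc m => acc ++ m) []
  let all_names? := all_list.foldl
      (fun acc? mentor => acc?.bind (fun acc => (pvFirst? mentor).map (fun n => acc ++ [n])))
      (some [])
  match all_names? with
  | none => ""  -- unreachable under Pre_ (Python raises IndexError here)
  | some all_names_list =>
    let unique_names := PySem.Set.ofList all_names_list
    let all_names_sorted := PySem.List.sorted unique_names (fun x => x) false
    "Уникальные имена преподавателей: " ++ PySem.Str.join ", " all_names_sorted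

-- ===== PORT B =====
def get_unicue_names_alt (mentors : List (List String)) : String :=
  match (mentors.flatMap (fun course => course)).mapM pvFirst? with
  | none => ""  -- unreachable under Pre_ (Python raises IndexError here)
  | some firsts =>
    let names := PySem.List.sorted firsts (fun x => x) false
    let result := (names.foldl
        (fun (st : List String × Option String) name =>
          if some name ≠ st.2 then (st.1 ++ [name], some name) else st)
        ([], none)).1
    "Уникальные имена преподавателей: " ++ PySem.Str.join ", " result

-- ===== PRECONDITION & SPEC =====
-- Pre_ excludes inputs containing a mentor string with no whitespace-separated word
-- (empty or whitespace-only), on which the Python A raises IndexError at split()[0].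
def Pre_get_unicue_names (mentors : List (List String)) : Prop :=
  ∀ c ∈ mentors, ∀ m ∈ c, PySem.Str.split₀ m ≠ []
instance (mentors : List (List String)) : Decidable (Pre_get_unicue_names mentors) := by
  unfold Pre_get_unicue_names; infer_instance
def pvWitness_get_unicue_names : List (List String) := [["Ann Smith", "Bob"], ["Ann X"]]

def Spec_get_unicue_names (mentors : List (List String)) (out : String) : Prop := out = get_unicue_names_alt mentors
instance (mentors : List (List String)) (out : String) : Decidable (Spec_get_unicue_names mentors out) := by unfold Spec_get_unicue_names; infer_instance

-- ===== CLAIM (what is proved, stated in full; the proofs are below) =====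
def Claim_equal_get_unicue_names : Prop := ∀ (mentors : List (List String)), Dom_get_unicue_names mentors → Pre_get_unicue_names mentors → Spec_get_unicue_names mentors (get_unicue_names mentors)

-- ===== LEMMAS AND PROOFS =====

-- the total first-name extractor used only inside the proofs
def pvF (m : String) : String := (pvFirst? m).getD ""

lemma pvFirst?_eq_some {m : String} (h : PySem.Str.split₀ m ≠ []) :
    pvFirst? m = some (pvF m) := by
  unfold pvF pvFirst?
  cases hs : PySem.Str.split₀ m with
  | nil => exact absurd hs h
  | cons a t => simp [PySem.List.pyGet?, PySem.List.pyIdx?]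

lemma foldA_eq (l : List String) (acc : List String)
    (h : ∀ m ∈ l, PySem.Str.split₀ m ≠ []) :
    l.foldl (fun acc? mentor => acc?.bind (fun acc => (pvFirst? mentor).map (fun n => acc ++ [n])))
      (some acc) = some (acc ++ l.map pvF) := by
  induction l generalizing acc with
  | nil => simp
  | cons a t ih =>
    simp only [List.foldl_cons, List.map_cons]
    rw [pvFirst?_eq_some (h a (by simp))]
    simpa using ih (acc ++ [pvF a]) (fun m hm => h m (by simp [hm]))

lemma mapM_eq (l : List String) (h : ∀ m ∈ l, PySem.Str.split₀ m ≠ []) :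
    l.mapM pvFirst? = some (l.map pvF) := by
  induction l with
  | nil => simp
  | cons a t ih =>
    rw [List.mapM_cons, pvFirst?_eq_some (h a (by simp))]
    simp [ih (fun m hm => h m (by simp [hm]))]

-- recursive form of B's adjacent-dedup loop
def pvDedupAdj (prev : Option String) : List String → List String
  | [] => []
  | n :: t => if some n ≠ prev then n :: pvDedupAdj (some n) t else pvDedupAdj prev t

lemma foldB_eq (s : List String) (acc : List String) (prev : Option String) :
    (s.foldl
      (fun (st : List String × Option String) name =>
        if some name ≠ st.2 then (st.1 ++ [name], some name) else st)
      (acc, prev)).1 = acc ++ pvDedupAdj prev s := by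
  induction s generalizing acc prev with
  | nil => simp [pvDedupAdj]
  | cons n t ih =>
    simp only [List.foldl_cons, pvDedupAdj]
    by_cases h : some n = prev
    · rw [if_neg (by simp [h]), if_neg (by simp [h]), ih]
    · rw [if_pos h, if_pos h, ih]
      simp

lemma mem_pvDedupAdj {x : String} (s : List String) (prev : Option String)
    (hs : s.Pairwise (· ≤ ·)) (hlb : ∀ y ∈ s, ∀ p, prev = some p → p ≤ y) :
    x ∈ pvDedupAdj prev s ↔ x ∈ s ∧ some x ≠ prev := by
  induction s generalizing prev with
  | nil => simp [pvDedupAdj]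
  | cons n t ih =>
    rcases List.pairwise_cons.mp hs with ⟨hn, ht⟩
    simp only [pvDedupAdj]
    by_cases h : some n = prev
    · rw [if_neg (by simp [h]),
        ih prev ht (fun y hy p hp => hlb y (List.mem_cons_of_mem _ hy) p hp)]
      constructor
      · rintro ⟨hx, hne⟩; exact ⟨List.mem_cons_of_mem _ hx, hne⟩
      · rintro ⟨hx, hne⟩
        rcases List.mem_cons.mp hx with rfl | hx
        · exact absurd h hne
        · exact ⟨hx, hne⟩
    · rw [if_pos h, List.mem_cons,
        ih (some n) ht (fun y hy p hp => by cases hp; exact hn y hy)]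
      constructor
      · rintro (rfl | ⟨hx, hne⟩)
        · exact ⟨List.mem_cons_self, h⟩
        · refine ⟨List.mem_cons_of_mem _ hx, ?_⟩
          intro hp
          rcases prev with _ | p
          · simp at hp
          · have h1 : p ≤ n := hlb n List.mem_cons_self p rfl
            have h2 : n ≤ x := hn x hx
            have hxp : x = p := by injection hp
            have hxn : x = n := le_antisymm (hxp ▸ h1) h2
            exact hne (by rw [hxn])
      · rintro ⟨hx, hne⟩
        rcases List.mem_cons.mp hx with rfl | hx
        · exact Or.inl rfl
        · by_cases hxn : x = n
          · exact Or.inl hxn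
          · exact Or.inr ⟨hx, by simpa using hxn⟩

lemma pairwise_pvDedupAdj (s : List String) (prev : Option String)
    (hs : s.Pairwise (· ≤ ·)) (hlb : ∀ y ∈ s, ∀ p, prev = some p → p ≤ y) :
    (pvDedupAdj prev s).Pairwise (· < ·) ∧
      ∀ y ∈ pvDedupAdj prev s, ∀ p, prev = some p → p < y := by
  induction s generalizing prev with
  | nil => simp [pvDedupAdj]
  | cons n t ih =>
    rcases List.pairwise_cons.mp hs with ⟨hn, ht⟩
    simp only [pvDedupAdj]
    by_cases h : some n = prev
    · rw [if_neg (by simp [h])]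
      exact ih prev ht (fun y hy p hp => hlb y (List.mem_cons_of_mem _ hy) p hp)
    · rw [if_pos h]
      rcases ih (some n) ht (fun y hy p hp => by cases hp; exact hn y hy) with ⟨hpw, hgt⟩
      refine ⟨List.pairwise_cons.mpr ⟨fun y hy => hgt y hy n rfl, hpw⟩, ?_⟩
      intro y hy p hp
      have hpn : p < n := by
        have h1 : p ≤ n := hlb n List.mem_cons_self p hp
        rcases lt_or_eq_of_le h1 with h2 | h2
        · exact h2
        · exact absurd (by rw [hp, h2]) h
      rcases List.mem_cons.mp hy with rfl | hy
      · exact hpn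
      · exact lt_trans hpn (hgt y hy n rfl)

-- ===== VERDICT (by name: the statement is the Claim_ definition above) =====
theorem get_unicue_names_spec : Claim_equal_get_unicue_names := by
  intro mentors _ hpre
  have hall : ∀ m ∈ mentors.flatMap (fun course => course), PySem.Str.split₀ m ≠ [] := by
    intro m hm
    rcases List.mem_flatMap.mp hm with ⟨c, hc, hmc⟩
    exact hpre c hc m hmc
  unfold Spec_get_unicue_names get_unicue_names get_unicue_names_alt
  simp only [PySem.List.foldl_append_eq_flatMap (fun course => course) mentors [],
    List.nil_append, foldA_eq _ [] hall, mapM_eq _ hall]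
  have hs : (PySem.List.sorted ((mentors.flatMap (fun course => course)).map pvF) (fun x => x) false
      : List String).Pairwise (· ≤ ·) :=
    PySem.List.sorted_pairwise _ (fun x => x)
  have hlb : ∀ y ∈ PySem.List.sorted ((mentors.flatMap (fun course => course)).map pvF) (fun x => x) false,
      ∀ p, (none : Option String) = some p → p ≤ y := by
    intro y _ p hp; simp at hp
  have hpw := (pairwise_pvDedupAdj _ none hs hlb).1
  have hnd : (pvDedupAdj none
      (PySem.List.sorted ((mentors.flatMap (fun course => course)).map pvF) (fun x => x) false)).Nodup :=
    hpw.imp ne_of_lt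
  have hperm : (pvDedupAdj none
      (PySem.List.sorted ((mentors.flatMap (fun course => course)).map pvF) (fun x => x) false)).Perm
      (PySem.Set.ofList ((mentors.flatMap (fun course => course)).map pvF)) := by
    rw [List.perm_ext_iff_of_nodup hnd (PySem.Set.nodup_ofList _)]
    intro a
    rw [mem_pvDedupAdj _ none hs hlb, PySem.Set.mem_ofList]
    simp [PySem.List.mem_sorted]
  have hsorted := PySem.List.sorted_eq_of_perm_of_pairwise_lt
    (PySem.Set.ofList ((mentors.flatMap (fun course => course)).map pvF)) _ (fun x => x) hperm hpw
  rw [foldB_eq, hsorted]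
  simp
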